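-- pv_equiv track=rewrite | github.com/Rian-Ismael/Questoes-Python | sim5/u6/5154148519510016/comeram.py | quantos_comeram
-- ===== SOURCE A (Python) =====
-- def quantos_comeram(n, fila_pedidos):
--     quantia_disponivel = n
--     quantia_vendida = 0
--     for pedido in fila_pedidos:
--         if quantia_disponivel >= pedido:
--             quantia_disponivel -= pedido
--             quantia_vendida += pedido
--         else:
--             return quantia_vendida
--     return quantia_vendida
-- ===== SOURCE B (Python) =====
-- def quantos_comeram(n, fila_pedidos):
--     # Prefix-sum formulation: materialize cumulative totals, then take the
--     # last cumulative total that stays <= n (0 if none qualify).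
--     sums = []
--     t = 0
--     for p in fila_pedidos:
--         t += p
--         sums.append(t)
--     best = 0
--     for s in sums:
--         if s > n:
--             break
--         best = s
--     return best
-- ===== Notes on version B (the rewrite author's own statement) =====
-- stated objective: alternative
-- what changed: B replaces A's two accumulators (remaining supply, amount sold, early return) with a prefix-sum formulation: it materializes the cumulative order totals in a first pass and in a second pass returns the last cumulative total that stays <= n.
import Mathlib
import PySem

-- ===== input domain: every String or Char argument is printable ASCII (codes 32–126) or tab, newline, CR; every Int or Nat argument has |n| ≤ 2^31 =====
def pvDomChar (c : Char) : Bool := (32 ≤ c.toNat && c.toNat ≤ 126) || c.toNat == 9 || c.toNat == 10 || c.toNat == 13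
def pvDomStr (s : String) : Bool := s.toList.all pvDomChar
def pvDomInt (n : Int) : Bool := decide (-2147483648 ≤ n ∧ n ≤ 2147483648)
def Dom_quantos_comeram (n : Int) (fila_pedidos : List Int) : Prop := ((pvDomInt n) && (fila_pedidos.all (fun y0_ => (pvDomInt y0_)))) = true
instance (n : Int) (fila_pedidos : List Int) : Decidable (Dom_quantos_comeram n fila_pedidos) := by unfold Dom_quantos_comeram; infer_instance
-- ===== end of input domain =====

-- B restates A as a prefix-sum scan (build cumulative totals, keep the last one ≤ n): alternative decomposition, same cost.


-- ===== PORT A =====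
-- A: walks the queue keeping remaining supply and total sold, returning early.
def qcA_go (quantia_disponivel quantia_vendida : Int) : List Int → Int
  | [] => quantia_vendida
  | pedido :: rest =>
    if quantia_disponivel ≥ pedido then
      qcA_go (quantia_disponivel - pedido) (quantia_vendida + pedido) rest
    else
      quantia_vendida

def quantos_comeram (n : Int) (fila_pedidos : List Int) : Int :=
  qcA_go n 0 fila_pedidos

-- ===== PORT B =====
-- B (alternative decomposition): build prefix sums, then take the last one ≤ n.
def qcB_prefix (t : Int) : List Int → List Int
  | [] => []
  | p :: rest => (t + p) :: qcB_prefix (t + p) rest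

def qcB_scan (n best : Int) : List Int → Int
  | [] => best
  | s :: rest => if s > n then best else qcB_scan n s rest

def quantos_comeram_alt (n : Int) (fila_pedidos : List Int) : Int :=
  qcB_scan n 0 (qcB_prefix 0 fila_pedidos)

-- ===== PRECONDITION & SPEC =====
def Spec_quantos_comeram (n : Int) (fila_pedidos : List Int) (out : Int) : Prop := out = quantos_comeram_alt n fila_pedidos
instance (n : Int) (fila_pedidos : List Int) (out : Int) : Decidable (Spec_quantos_comeram n fila_pedidos out) := by unfold Spec_quantos_comeram; infer_instance

-- ===== CLAIM (what is proved, stated in full; the proofs are below) =====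
def Claim_equal_quantos_comeram : Prop := ∀ (n : Int) (fila_pedidos : List Int), Dom_quantos_comeram n fila_pedidos → Spec_quantos_comeram n fila_pedidos (quantos_comeram n fila_pedidos)

-- ===== LEMMAS AND PROOFS =====
-- Invariant: A's state (available = n - t, sold = t) matches B's scan over
-- prefix sums starting at t with best = t.
theorem qc_go_eq (n : Int) (xs : List Int) : ∀ t : Int,
    qcA_go (n - t) t xs = qcB_scan n t (qcB_prefix t xs) := by
  induction xs with
  | nil => intro t; rfl
  | cons p rest ih =>
    intro t
    simp only [qcA_go, qcB_prefix, qcB_scan]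
    by_cases h : n - t ≥ p
    · rw [if_pos h, if_neg (by omega)]
      have := ih (t + p)
      rw [show n - t - p = n - (t + p) by ring] at *
      simpa using this
    · rw [if_neg h, if_pos (by omega)]

-- ===== VERDICT (by name: the statement is the Claim_ definition above) =====
theorem quantos_comeram_spec : Claim_equal_quantos_comeram := by
  intro n fila _
  unfold Spec_quantos_comeram quantos_comeram quantos_comeram_alt
  simpa using qc_go_eq n fila 0
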